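-- pv_equiv track=rewrite | github.com/googleboy-byte/nakul | ai_services/diff_highlighter.py | _split_diff_chunks
-- ===== SOURCE A (Python) =====
-- from typing import List, Tuple
--
-- def _split_diff_chunks(diff_text: str) -> List[Tuple[str, str]]:
--     """Split diff into chunks of (type, content)."""
--     chunks = []
--     current_type = None
--     current_lines = []
--
--     for line in diff_text.splitlines(True):  # keepends=True
--         if line.startswith('+++') or line.startswith('---'):
--             line_type = 'meta'
--         elif line.startswith('+'):
--             line_type = 'add'
--         elif line.startswith('-'):
--             line_type = 'remove'
--         elif line.startswith('@@'):
--             line_type = 'header'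
--         else:
--             line_type = 'context'
--
--         if line_type != current_type:
--             if current_lines:
--                 chunks.append((current_type, ''.join(current_lines)))
--             current_type = line_type
--             current_lines = [line]
--         else:
--             current_lines.append(line)
--
--     if current_lines:
--         chunks.append((current_type, ''.join(current_lines)))
--
--     return chunks
-- ===== SOURCE B (Python) =====
-- from typing import List, Tuple
--
-- def _classify(line: str) -> str:
--     if line.startswith('+++') or line.startswith('---'):
--         return 'meta'
--     elif line.startswith('+'):
--         return 'add'
--     elif line.startswith('-'):
--         return 'remove'
--     elif line.startswith('@@'):
--         return 'header'
--     else: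
--         return 'context'
--
-- def _split_diff_chunks(diff_text: str) -> List[Tuple[str, str]]:
--     """Split diff into chunks of (type, content)."""
--     lines = diff_text.splitlines(True)
--     n = len(lines)
--     chunks = []
--     i = 0
--     while i < n:
--         k = _classify(lines[i])
--         j = i + 1
--         while j < n and _classify(lines[j]) == k:
--             j += 1
--         chunks.append((k, ''.join(lines[i:j])))
--         i = j
--     return chunks
-- ===== Notes on version B (the rewrite author's own statement) =====
-- stated objective: alternative
-- what changed: Replaces the current_type/current_lines accumulator-and-flush state machine by a run-length scan: a classify helper plus a two-pointer loop that finds each maximal run of equally-classified lines and joins it in one step.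
import Mathlib
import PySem

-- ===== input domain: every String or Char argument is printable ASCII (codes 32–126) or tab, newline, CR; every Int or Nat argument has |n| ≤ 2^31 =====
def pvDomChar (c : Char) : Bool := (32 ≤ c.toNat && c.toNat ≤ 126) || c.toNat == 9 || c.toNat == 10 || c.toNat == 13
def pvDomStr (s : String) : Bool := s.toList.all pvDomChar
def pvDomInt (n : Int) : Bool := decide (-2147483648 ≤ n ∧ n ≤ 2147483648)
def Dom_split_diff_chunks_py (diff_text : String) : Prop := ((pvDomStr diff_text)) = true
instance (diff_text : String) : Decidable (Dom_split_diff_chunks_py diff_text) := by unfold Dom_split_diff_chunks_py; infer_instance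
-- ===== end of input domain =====

-- B replaces A's accumulator-and-flush state machine by a classify helper plus a run-length
-- scan over maximal runs of equally-classified lines (objective: alternative decomposition).

-- shared helper: Python str.splitlines(keepends=True), hand-ported; exact on Dom, where the
-- only line-break characters available are '\n', '\r' and the pair "\r\n"
def pvSplitlinesKeep : List Char → List (List Char)
  | [] => []
  | '\r' :: '\n' :: rest => ['\r', '\n'] :: pvSplitlinesKeep rest
  | '\n' :: rest => ['\n'] :: pvSplitlinesKeep rest
  | '\r' :: rest => ['\r'] :: pvSplitlinesKeep rest
  | c :: rest =>
    match pvSplitlinesKeep rest with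
    | [] => [[c]]
    | l :: ls => (c :: l) :: ls
  termination_by cs => cs.length
  decreasing_by all_goals (simp only [List.length_cons]; omega)

-- ===== PORT A =====
-- A's loop: state (chunks, current_type, current_lines), flushing when the classified type changes
def pvLoopA : List (List Char) → List (String × String) → Option String → List (List Char) → List (String × String)
  | [], chunks, ct, cl =>
      if cl.isEmpty then chunks else chunks ++ [(ct.getD "", String.ofList cl.flatten)]
  | line :: rest, chunks, ct, cl =>
      let lt :=
        if PySem.Chars.startswith line "+++".toList || PySem.Chars.startswith line "---".toList then "meta"
        else if PySem.Chars.startswith line "+".toList then "add"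
        else if PySem.Chars.startswith line "-".toList then "remove"
        else if PySem.Chars.startswith line "@@".toList then "header"
        else "context"
      if some lt ≠ ct then
        pvLoopA rest (if cl.isEmpty then chunks else chunks ++ [(ct.getD "", String.ofList cl.flatten)]) (some lt) [line]
      else
        pvLoopA rest chunks ct (cl ++ [line])

def split_diff_chunks_py (diff_text : String) : List (String × String) :=
  pvLoopA (pvSplitlinesKeep diff_text.toList) [] none []

-- ===== PORT B =====
def pvClassify (line : List Char) : String :=
  if PySem.Chars.startswith line "+++".toList || PySem.Chars.startswith line "---".toList then "meta"
  else if PySem.Chars.startswith line "+".toList then "add"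
  else if PySem.Chars.startswith line "-".toList then "remove"
  else if PySem.Chars.startswith line "@@".toList then "header"
  else "context"

-- B's outer loop: peel off one maximal run of equally-classified lines per step
def pvRuns : List (List Char) → List (String × List (List Char))
  | [] => []
  | l :: ls =>
    let k := pvClassify l
    (k, l :: ls.takeWhile (fun x => pvClassify x == k)) ::
      pvRuns (ls.dropWhile (fun x => pvClassify x == k))
  termination_by ls => ls.length
  decreasing_by
    simp only [List.length_cons]
    exact Nat.lt_succ_of_le (List.length_dropWhile_le _ _)

def split_diff_chunks_py_alt (diff_text : String) : List (String × String) :=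
  (pvRuns (pvSplitlinesKeep diff_text.toList)).map (fun p => (p.1, String.ofList p.2.flatten))

-- ===== PRECONDITION & SPEC =====
def Spec_split_diff_chunks_py (diff_text : String) (out : List (String × String)) : Prop := out = split_diff_chunks_py_alt diff_text
instance (diff_text : String) (out : List (String × String)) : Decidable (Spec_split_diff_chunks_py diff_text out) := by unfold Spec_split_diff_chunks_py; infer_instance

-- ===== CLAIM (what is proved, stated in full; the proofs are below) =====
def Claim_equal_split_diff_chunks_py : Prop := ∀ (diff_text : String), Dom_split_diff_chunks_py diff_text → Spec_split_diff_chunks_py diff_text (split_diff_chunks_py diff_text)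

-- ===== LEMMAS AND PROOFS =====

theorem pvLoopA_eq_runs (ls : List (List Char)) :
    ∀ (chunks : List (String × String)) (k : String) (cl : List (List Char)), cl ≠ [] →
    pvLoopA ls chunks (some k) cl =
      chunks ++ ((k, cl ++ ls.takeWhile (fun x => pvClassify x == k)) ::
        pvRuns (ls.dropWhile (fun x => pvClassify x == k))).map
          (fun p => (p.1, String.ofList p.2.flatten)) := by
  induction ls with
  | nil =>
    intro chunks k cl hcl
    simp [pvLoopA, pvRuns, List.isEmpty_iff, hcl]
  | cons l ls ih =>
    intro chunks k cl hcl
    by_cases h : pvClassify l = k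
    · have : pvLoopA (l :: ls) chunks (some k) cl = pvLoopA ls chunks (some k) (cl ++ [l]) := by
        simp only [pvLoopA, pvClassify] at *
        rw [h]
        simp
      rw [this, ih chunks k (cl ++ [l]) (by simp)]
      simp [List.takeWhile, List.dropWhile, h]
    · have : pvLoopA (l :: ls) chunks (some k) cl =
          pvLoopA ls (chunks ++ [(k, String.ofList cl.flatten)]) (some (pvClassify l)) [l] := by
        simp only [pvLoopA, pvClassify] at *
        split <;> simp_all [List.isEmpty_iff]
      rw [this, ih _ (pvClassify l) [l] (by simp)]
      have hb : (pvClassify l == k) = false := by simp [h]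
      simp [pvRuns, List.takeWhile, List.dropWhile, hb]

-- ===== VERDICT (by name: the statement is the Claim_ definition above) =====
theorem split_diff_chunks_py_spec : Claim_equal_split_diff_chunks_py := by
  intro s _
  show split_diff_chunks_py s = split_diff_chunks_py_alt s
  unfold split_diff_chunks_py split_diff_chunks_py_alt
  cases hls : pvSplitlinesKeep s.toList with
  | nil => simp [pvLoopA, pvRuns]
  | cons l ls =>
    have h1 : pvLoopA (l :: ls) [] none [] = pvLoopA ls [] (some (pvClassify l)) [l] := by
      simp [pvLoopA, pvClassify]
    rw [h1, pvLoopA_eq_runs ls [] (pvClassify l) [l] (by simp)]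
    simp [pvRuns]
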